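-- pv_equiv track=rewrite | github.com/anleik/algoharjoitus | logic.py | shared_edge
-- ===== SOURCE A (Python) =====
-- def get_edges(triangle):
--     """Palauttaa kolmion sivut.
--     """
--     edges = ((triangle[0], triangle[1]), (triangle[1], triangle[2]), (triangle[2], triangle[0]))
--     return edges
--
-- def shared_edge(edge, triangles):
--     """Laskee kuinka monta kertaa sivu esiintyy listassa kolmioita ja palauttaa määrän."""
--     tricount = 0
--     for triangle in triangles:
--         triangle_edges = get_edges(triangle)
--         for tri_edge in triangle_edges:
--             if edge == tri_edge:
--                 tricount += 1
--             elif edge == tuple(reversed(tri_edge)):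
--                 tricount += 1
--     return tricount
-- ===== SOURCE B (Python) =====
-- def shared_edge(edge, triangles):
--     """Counts occurrences of an (orientation-free) edge among the triangles'
--     edges by building a count index once, then doing a single lookup."""
--     def key(a, b):
--         return (a, b) if a <= b else (b, a)
--     counts = {}
--     for a, b, c in triangles:
--         for k in (key(a, b), key(b, c), key(c, a)):
--             counts[k] = counts.get(k, 0) + 1
--     return counts.get(key(edge[0], edge[1]), 0)
-- ===== Notes on version B (the rewrite author's own statement) =====
-- stated objective: alternative
-- what changed: B replaces A's per-triangle equal-or-reversed comparison loop with a one-pass count index keyed by the canonically oriented (sorted) edge, answered by a single dictionary lookup.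
import Mathlib
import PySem

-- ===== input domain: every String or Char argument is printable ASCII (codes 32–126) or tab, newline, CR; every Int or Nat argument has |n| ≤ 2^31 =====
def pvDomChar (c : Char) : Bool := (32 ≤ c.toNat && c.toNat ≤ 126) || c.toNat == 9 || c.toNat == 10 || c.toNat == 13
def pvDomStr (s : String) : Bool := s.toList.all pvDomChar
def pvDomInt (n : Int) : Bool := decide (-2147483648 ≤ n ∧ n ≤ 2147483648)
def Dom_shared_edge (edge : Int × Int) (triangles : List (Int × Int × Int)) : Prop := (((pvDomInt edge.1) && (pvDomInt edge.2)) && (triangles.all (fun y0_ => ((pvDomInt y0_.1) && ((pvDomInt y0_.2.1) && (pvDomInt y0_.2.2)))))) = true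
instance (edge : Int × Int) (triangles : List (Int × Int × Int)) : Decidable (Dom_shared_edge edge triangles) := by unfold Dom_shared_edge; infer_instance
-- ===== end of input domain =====

-- B builds a count index keyed by the canonically-oriented edge in one pass and answers with a single lookup (simpler/alternative; same return value).

-- ===== PORT A =====
def get_edges (triangle : Int × Int × Int) : List (Int × Int) :=
  [(triangle.1, triangle.2.1), (triangle.2.1, triangle.2.2), (triangle.2.2, triangle.1)]

def shared_edge (edge : Int × Int) (triangles : List (Int × Int × Int)) : Int :=
  triangles.foldl (fun tricount triangle =>
    (get_edges triangle).foldl (fun tc tri_edge =>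
      if edge = tri_edge then tc + 1
      else if edge = (tri_edge.2, tri_edge.1) then tc + 1
      else tc) tricount) 0

-- ===== PORT B =====
def edgeKey (a b : Int) : Int × Int := if a ≤ b then (a, b) else (b, a)

def shared_edge_alt (edge : Int × Int) (triangles : List (Int × Int × Int)) : Int :=
  let counts : PySem.Dict (Int × Int) Int :=
    triangles.foldl (fun d t =>
      [edgeKey t.1 t.2.1, edgeKey t.2.1 t.2.2, edgeKey t.2.2 t.1].foldl
        (fun d k => d.insert k (d.getD k 0 + 1)) d) PySem.Dict.empty
  counts.getD (edgeKey edge.1 edge.2) 0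

-- ===== PRECONDITION & SPEC =====
def Spec_shared_edge (edge : Int × Int) (triangles : List (Int × Int × Int)) (out : Int) : Prop := out = shared_edge_alt edge triangles
instance (edge : Int × Int) (triangles : List (Int × Int × Int)) (out : Int) : Decidable (Spec_shared_edge edge triangles out) := by unfold Spec_shared_edge; infer_instance

-- ===== CLAIM (what is proved, stated in full; the proofs are below) =====
def Claim_equal_shared_edge : Prop := ∀ (edge : Int × Int) (triangles : List (Int × Int × Int)), Dom_shared_edge edge triangles → Spec_shared_edge edge triangles (shared_edge edge triangles)

-- ===== LEMMAS AND PROOFS =====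

-- the key test is exactly A's "equal or reversed" test
lemma key_eq_iff (e te : Int × Int) :
    edgeKey te.1 te.2 = edgeKey e.1 e.2 ↔ (e = te ∨ e = (te.2, te.1)) := by
  rcases e with ⟨a, b⟩; rcases te with ⟨c, d⟩
  simp only [edgeKey]
  split_ifs <;> simp only [Prod.mk.injEq] <;> omega

-- one step of A's inner loop, expressed through the canonical key
lemma step_eq (e te : Int × Int) (tc : Int) :
    (if e = te then tc + 1 else if e = (te.2, te.1) then tc + 1 else tc)
    = tc + (if edgeKey te.1 te.2 = edgeKey e.1 e.2 then 1 else 0) := by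
  by_cases hk : edgeKey te.1 te.2 = edgeKey e.1 e.2 <;>
    rcases (key_eq_iff e te) with ⟨mp, mpr⟩ <;>
    simp only [hk, if_pos, ite_false] <;>
    by_cases h1 : e = te <;> by_cases h2 : e = (te.2, te.1) <;> simp_all

-- A's inner loop over one triangle adds the number of that triangle's keys equal to edge's key
lemma inner_A (e : Int × Int) (t : Int × Int × Int) (c : Int) :
    (get_edges t).foldl (fun tc tri_edge =>
      if e = tri_edge then tc + 1
      else if e = (tri_edge.2, tri_edge.1) then tc + 1
      else tc) c
    = c + ([edgeKey t.1 t.2.1, edgeKey t.2.1 t.2.2, edgeKey t.2.2 t.1].count (edgeKey e.1 e.2) : Int) := by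
  simp only [get_edges, List.foldl, step_eq, List.count_cons, List.count_nil, beq_iff_eq]
  push_cast
  split_ifs <;> ring

-- A's fold is additive in its accumulator
lemma afold_shift (e : Int × Int) (tris : List (Int × Int × Int)) :
    ∀ (c k : Int),
    tris.foldl (fun tricount triangle =>
      (get_edges triangle).foldl (fun tc tri_edge =>
        if e = tri_edge then tc + 1
        else if e = (tri_edge.2, tri_edge.1) then tc + 1
        else tc) tricount) (c + k)
    = tris.foldl (fun tricount triangle =>
      (get_edges triangle).foldl (fun tc tri_edge =>
        if e = tri_edge then tc + 1
        else if e = (tri_edge.2, tri_edge.1) then tc + 1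
        else tc) tricount) c + k := by
  induction tris with
  | nil => intro c k; rfl
  | cons t rest ih =>
      intro c k
      rw [List.foldl_cons, List.foldl_cons, inner_A, inner_A, add_right_comm, ih]

-- loop invariant: the count index lookup accumulates exactly A's count
lemma main_inv (e : Int × Int) (tris : List (Int × Int × Int)) :
    ∀ (d : PySem.Dict (Int × Int) Int) (c : Int),
    (tris.foldl (fun d t =>
      [edgeKey t.1 t.2.1, edgeKey t.2.1 t.2.2, edgeKey t.2.2 t.1].foldl
        (fun d k => d.insert k (d.getD k 0 + 1)) d) d).getD (edgeKey e.1 e.2) 0 + c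
    = d.getD (edgeKey e.1 e.2) 0 +
      tris.foldl (fun tricount triangle =>
        (get_edges triangle).foldl (fun tc tri_edge =>
          if e = tri_edge then tc + 1
          else if e = (tri_edge.2, tri_edge.1) then tc + 1
          else tc) tricount) c := by
  induction tris with
  | nil => intro d c; rfl
  | cons t rest ih =>
      intro d c
      conv_lhs => rw [List.foldl_cons]
      rw [ih, PySem.Dict.getD_foldl_insert_add_one]
      conv_rhs => rw [List.foldl_cons]
      rw [inner_A, afold_shift]
      ring

-- ===== VERDICT (by name: the statement is the Claim_ definition above) =====
theorem shared_edge_spec : Claim_equal_shared_edge := by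
  intro edge triangles _
  unfold Spec_shared_edge shared_edge shared_edge_alt
  have h := main_inv edge triangles PySem.Dict.empty 0
  simp only [add_zero, PySem.Dict.getD_empty, zero_add] at h
  exact h.symm
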